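-- pv_equiv track=rewrite | github.com/SvobodaJakub/pdf-to-g4-compressor | src/webapp_build/i18n-tools/i18n-validate-legacy.py | check_preserved_terms
-- ===== SOURCE A (Python) =====
-- REFERENCE_LANGS = ['en', 'de', 'cs', 'sk', 'pl', 'ru']
--
-- PRESERVED_TERMS = ['PDF', 'DPI', 'G4', 'CCITT', 'A4', 'Letter', 'Legal', 'PDF.js', 'pako', 'G4Enc', 'Apache 2.0']
--
-- def check_preserved_terms(translations):
--     """Check if technical terms are preserved correctly."""
--     issues = []
--
--     # Get reference values for terms that should be consistent
--     reference = {}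
--     for term in PRESERVED_TERMS:
--         reference[term.lower()] = term
--
--     for lang, fields in sorted(translations.items()):
--         if lang in REFERENCE_LANGS:
--             continue
--
--         for field_name, field_value in fields.items():
--             # Check if preserved terms appear in wrong form
--             for term in PRESERVED_TERMS:
--                 # Count occurrences in reference languages
--                 ref_count = sum(1 for ref_lang in REFERENCE_LANGS
--                                if ref_lang in translations
--                                and field_name in translations[ref_lang]
--                                and term in translations[ref_lang][field_name])
--
--                 if ref_count > 0:
--                     # This term should appear in this field
--                     if term not in field_value:
--                         # Allow for variations like "PDF.js" vs "PDF.js"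
--                         if not any(variant in field_value for variant in [term.lower(), term.upper()]):
--                             issues.append(f"{lang}.{field_name}: Missing expected term '{term}'")
--
--     return issues
-- ===== SOURCE B (Python) =====
-- REFERENCE_LANGS = ['en', 'de', 'cs', 'sk', 'pl', 'ru']
--
-- PRESERVED_TERMS = ['PDF', 'DPI', 'G4', 'CCITT', 'A4', 'Letter', 'Legal', 'PDF.js', 'pako', 'G4Enc', 'Apache 2.0']
--
-- def check_preserved_terms(translations):
--     """Check if technical terms are preserved correctly (index-based rewrite)."""
--     # One pre-pass over the reference languages: for each field name, the set of
--     # preserved terms that occur in that field in at least one reference language.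
--     ref_index = {}
--     for ref_lang in REFERENCE_LANGS:
--         fields = translations.get(ref_lang)
--         if fields is None:
--             continue
--         for field_name, value in fields.items():
--             bucket = ref_index.setdefault(field_name, set())
--             for term in PRESERVED_TERMS:
--                 if term in value:
--                     bucket.add(term)
--
--     issues = []
--     for lang, fields in sorted(translations.items()):
--         if lang in REFERENCE_LANGS:
--             continue
--         for field_name, field_value in fields.items():
--             expected = ref_index.get(field_name, ())
--             for term in PRESERVED_TERMS:
--                 if (term in expected and term not in field_value
--                         and term.lower() not in field_value
--                         and term.upper() not in field_value):
--                     issues.append(f"{lang}.{field_name}: Missing expected term '{term}'")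
--     return issues
-- ===== Notes on version B (the rewrite author's own statement) =====
-- stated objective: faster
-- what changed: B builds a field-name -> preserved-term-set reference index in one pre-pass over the six reference languages, so the per-(language, field, term) rescan of all reference languages (dict lookups plus substring searches) disappears from the main loop.
import Mathlib
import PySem

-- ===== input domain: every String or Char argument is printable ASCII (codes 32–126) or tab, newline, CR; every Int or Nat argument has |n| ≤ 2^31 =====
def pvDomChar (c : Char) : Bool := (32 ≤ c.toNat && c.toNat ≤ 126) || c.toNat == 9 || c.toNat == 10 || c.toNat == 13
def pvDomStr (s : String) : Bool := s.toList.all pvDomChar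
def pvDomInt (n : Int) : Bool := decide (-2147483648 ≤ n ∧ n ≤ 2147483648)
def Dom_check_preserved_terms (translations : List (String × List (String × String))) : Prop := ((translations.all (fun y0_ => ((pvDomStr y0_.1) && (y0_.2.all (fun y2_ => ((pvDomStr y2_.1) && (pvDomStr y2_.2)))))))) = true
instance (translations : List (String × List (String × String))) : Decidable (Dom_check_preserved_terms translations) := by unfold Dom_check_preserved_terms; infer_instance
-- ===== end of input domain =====

-- B builds the field→terms reference index once instead of rescanning all six reference
-- languages for every (language, field, term) triple; return value equivalence only.

def pvRefLangs : List String := ["en", "de", "cs", "sk", "pl", "ru"]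

def pvTerms : List String := ["PDF", "DPI", "G4", "CCITT", "A4", "Letter", "Legal", "PDF.js", "pako", "G4Enc", "Apache 2.0"]

def pvMsg (lang fn term : String) : String :=
  lang ++ "." ++ fn ++ ": Missing expected term '" ++ term ++ "'"

-- ===== PORT A =====
-- the generator's condition: ref_lang in translations and field_name in translations[ref_lang]
-- and term in translations[ref_lang][field_name]
def pvRefHit (translations : List (String × List (String × String))) (fn term rl : String) : Bool :=
  match (PySem.Dict.mk translations).get? rl with
  | none => false
  | some flds =>
    match (PySem.Dict.mk flds).get? fn with
    | none => false
    | some v => PySem.Str.isIn term v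

def check_preserved_terms (translations : List (String × List (String × String))) : List String :=
  let _reference : PySem.Dict String String :=
    pvTerms.foldl (fun d term => d.insert (PySem.Str.lower term) term) PySem.Dict.empty
  (PySem.List.sorted translations (fun p => p.1) false).foldl (fun issues p =>
    if pvRefLangs.contains p.1 then issues
    else
      p.2.foldl (fun issues q =>
        pvTerms.foldl (fun issues term =>
          let ref_count : Int :=
            pvRefLangs.foldl (fun n rl => if pvRefHit translations q.1 term rl then n + 1 else n) 0
          if 0 < ref_count then
            if !(PySem.Str.isIn term q.2) then
              if !([PySem.Str.lower term, PySem.Str.upper term].any (fun v => PySem.Str.isIn v q.2)) then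
                issues ++ [pvMsg p.1 q.1 term]
              else issues
            else issues
          else issues) issues) issues) []

-- ===== PORT B =====
-- one pre-pass: field name → set of preserved terms occurring in that field in some reference language
def pvRefIndex (translations : List (String × List (String × String))) :
    PySem.Dict String (PySem.Set String) :=
  pvRefLangs.foldl (fun d rl =>
    match (PySem.Dict.mk translations).get? rl with
    | none => d
    | some flds =>
      flds.foldl (fun d q =>
        d.insert q.1
          (pvTerms.foldl (fun s term => if PySem.Str.isIn term q.2 then PySem.Set.add s term else s)
            (d.getD q.1 PySem.Set.empty))) d) PySem.Dict.empty

def check_preserved_terms_alt (translations : List (String × List (String × String))) : List String :=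
  let idx := pvRefIndex translations
  (PySem.List.sorted translations (fun p => p.1) false).foldl (fun issues p =>
    if pvRefLangs.contains p.1 then issues
    else
      p.2.foldl (fun issues q =>
        let expected := idx.getD q.1 PySem.Set.empty
        pvTerms.foldl (fun issues term =>
          if PySem.Set.contains expected term && !(PySem.Str.isIn term q.2) &&
             !(PySem.Str.isIn (PySem.Str.lower term) q.2) &&
             !(PySem.Str.isIn (PySem.Str.upper term) q.2) then
            issues ++ [pvMsg p.1 q.1 term]
          else issues) issues) issues) []

-- ===== PRECONDITION & SPEC =====
-- Pre_ excludes association lists in which a reference language's field list has a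
-- duplicated field key: such lists do not represent any Python dict (dict keys are unique),
-- so A never receives them; A's first-match lookup into them vs B's iteration over all of
-- their entries are both accidental conventions.
def Pre_check_preserved_terms (translations : List (String × List (String × String))) : Prop :=
  ∀ p ∈ translations, p.1 ∈ pvRefLangs → (p.2.map Prod.fst).Nodup

instance (translations : List (String × List (String × String))) : Decidable (Pre_check_preserved_terms translations) := by unfold Pre_check_preserved_terms; infer_instance

def pvWitness_check_preserved_terms : (List (String × List (String × String))) :=
  [("en", [("title", "PDF tool")]), ("fr", [("title", "outil")])]

def Spec_check_preserved_terms (translations : List (String × List (String × String))) (out : List String) : Prop := out = check_preserved_terms_alt translations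
instance (translations : List (String × List (String × String))) (out : List String) : Decidable (Spec_check_preserved_terms translations out) := by unfold Spec_check_preserved_terms; infer_instance

-- ===== CLAIM (what is proved, stated in full; the proofs are below) =====
def Claim_equal_check_preserved_terms : Prop := ∀ (translations : List (String × List (String × String))), Dom_check_preserved_terms translations → Pre_check_preserved_terms translations → Spec_check_preserved_terms translations (check_preserved_terms translations)

-- ===== LEMMAS AND PROOFS =====

-- membership in the inner term fold of pvRefIndex
theorem pv_mem_termFold (v : String) (term : String) (l : List String) (s : PySem.Set String) :
    term ∈ l.foldl (fun s t => if PySem.Str.isIn t v then PySem.Set.add s t else s) s ↔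
      term ∈ s ∨ (term ∈ l ∧ PySem.Str.isIn term v = true) := by
  induction l generalizing s with
  | nil => simp
  | cons t ts ih =>
    simp only [List.foldl_cons, ih]
    by_cases h : PySem.Str.isIn t v = true
    · simp only [h, if_pos]
      rw [PySem.Set.mem_add]
      constructor
      · rintro (⟨h1 | h1⟩ | ⟨h1, h2⟩)
        · exact Or.inl h1
        · subst h1; exact Or.inr ⟨List.mem_cons_self .., h⟩
        · exact Or.inr ⟨List.mem_cons_of_mem _ h1, h2⟩
      · rintro (h1 | ⟨h1, h2⟩)
        · exact Or.inl (Or.inl h1)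
        · rcases List.mem_cons.mp h1 with h1 | h1
          · exact Or.inl (Or.inr h1)
          · exact Or.inr ⟨h1, h2⟩
    · simp only [h, if_neg, Bool.false_eq_true, not_false_iff]
      constructor
      · rintro (h1 | ⟨h1, h2⟩)
        · exact Or.inl h1
        · exact Or.inr ⟨List.mem_cons_of_mem _ h1, h2⟩
      · rintro (h1 | ⟨h1, h2⟩)
        · exact Or.inl h1
        · rcases List.mem_cons.mp h1 with h1 | h1
          · subst h1; exact absurd h2 h
          · exact Or.inr ⟨h1, h2⟩

-- membership after folding one language's field list into the index
theorem pv_mem_fldFold (flds : List (String × String)) (hnd : (flds.map Prod.fst).Nodup)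
    (d : PySem.Dict String (PySem.Set String)) (fn term : String) :
    (term ∈ (flds.foldl (fun d q =>
        d.insert q.1
          (pvTerms.foldl (fun s t => if PySem.Str.isIn t q.2 then PySem.Set.add s t else s)
            (d.getD q.1 PySem.Set.empty))) d).getD fn PySem.Set.empty) ↔
      term ∈ d.getD fn PySem.Set.empty ∨
        (∃ v, (PySem.Dict.mk flds).get? fn = some v ∧ term ∈ pvTerms ∧ PySem.Str.isIn term v = true) := by
  induction flds generalizing d with
  | nil =>
    simp [show (PySem.Dict.mk ([] : List (String × String))).get? fn = none from rfl]
  | cons q qs ih =>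
    simp only [List.map_cons, List.nodup_cons] at hnd
    obtain ⟨hq, hnd'⟩ := hnd
    simp only [List.foldl_cons]
    rw [ih hnd']
    by_cases hfn : fn = q.1
    · subst hfn
      rw [PySem.Dict.getD_insert_self, pv_mem_termFold]
      have hget : (PySem.Dict.mk (q :: qs)).get? q.1 = some q.2 := by
        rw [show (q :: qs) = (q.1, q.2) :: qs by simp, PySem.Dict.get?_mk_cons]
        simp
      have hnone : (PySem.Dict.mk qs).get? q.1 = none := by
        rw [PySem.Dict.get?_eq_none_iff_not_mem_keys]
        simpa [PySem.Dict.keys] using hq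
      constructor
      · rintro (h | ⟨v, hv, h2, h3⟩)
        · rcases h with h | ⟨h1, h2⟩
          · exact Or.inl h
          · exact Or.inr ⟨q.2, hget, h1, h2⟩
        · rw [hnone] at hv; cases hv
      · rintro (h | ⟨v, hv, h2, h3⟩)
        · exact Or.inl (Or.inl h)
        · rw [hget] at hv; cases hv; exact Or.inl (Or.inr ⟨h2, h3⟩)
    · rw [PySem.Dict.getD_insert_of_ne _ _ _ hfn]
      have hget : (PySem.Dict.mk (q :: qs)).get? fn = (PySem.Dict.mk qs).get? fn := by
        rw [show (q :: qs) = (q.1, q.2) :: qs by simp, PySem.Dict.get?_mk_cons]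
        simp [show (q.1 == fn) = false from beq_eq_false_iff_ne.mpr (fun h => hfn h.symm)]
      rw [hget]

-- membership in the full reference index, one language at a time
theorem pv_mem_langFold (tr : List (String × List (String × String)))
    (hpre : ∀ p ∈ tr, p.1 ∈ pvRefLangs → (p.2.map Prod.fst).Nodup) (rls : List String)
    (hrls : ∀ rl ∈ rls, rl ∈ pvRefLangs)
    (d : PySem.Dict String (PySem.Set String)) (fn term : String) :
    (term ∈ (rls.foldl (fun d rl =>
      match (PySem.Dict.mk tr).get? rl with
      | none => d
      | some flds =>
        flds.foldl (fun d q =>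
          d.insert q.1
            (pvTerms.foldl (fun s term => if PySem.Str.isIn term q.2 then PySem.Set.add s term else s)
              (d.getD q.1 PySem.Set.empty))) d) d).getD fn PySem.Set.empty) ↔
      term ∈ d.getD fn PySem.Set.empty ∨
        (term ∈ pvTerms ∧ ∃ rl ∈ rls, pvRefHit tr fn term rl = true) := by
  induction rls generalizing d with
  | nil => simp
  | cons rl rls ih =>
    have hrls' : ∀ rl' ∈ rls, rl' ∈ pvRefLangs := fun rl' h => hrls rl' (List.mem_cons_of_mem _ h)
    simp only [List.foldl_cons]
    cases hget : (PySem.Dict.mk tr).get? rl with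
    | none =>
      have hrl : pvRefHit tr fn term rl = false := by unfold pvRefHit; rw [hget]
      rw [ih hrls']
      simp only [List.mem_cons]
      constructor
      · rintro (h | ⟨h1, rl', h2, h3⟩)
        · exact Or.inl h
        · exact Or.inr ⟨h1, rl', Or.inr h2, h3⟩
      · rintro (h | ⟨h1, rl', (h2 | h2), h3⟩)
        · exact Or.inl h
        · subst h2; simp [hrl] at h3
        · exact Or.inr ⟨h1, rl', h2, h3⟩
    | some flds =>
      have hnd : (flds.map Prod.fst).Nodup :=
        hpre (rl, flds) (PySem.Dict.mem_items_of_get?_eq_some _ hget)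
          (hrls rl (List.mem_cons_self ..))
      have hflds : (∃ v, (PySem.Dict.mk flds).get? fn = some v ∧ term ∈ pvTerms ∧ PySem.Str.isIn term v = true) ↔
          (term ∈ pvTerms ∧ pvRefHit tr fn term rl = true) := by
        unfold pvRefHit
        rw [hget]
        cases hv : (PySem.Dict.mk flds).get? fn with
        | none => simp [hv]
        | some v => simp [hv]
      rw [ih hrls', pv_mem_fldFold flds hnd]
      simp only [List.mem_cons]
      constructor
      · rintro ((h | h) | ⟨h1, rl', h2, h3⟩)
        · exact Or.inl h
        · obtain ⟨h1, h2⟩ := hflds.mp h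
          exact Or.inr ⟨h1, rl, Or.inl rfl, h2⟩
        · exact Or.inr ⟨h1, rl', Or.inr h2, h3⟩
      · rintro (h | ⟨h1, rl', (h2 | h2), h3⟩)
        · exact Or.inl (Or.inl h)
        · subst h2; exact Or.inl (Or.inr (hflds.mpr ⟨h1, h3⟩))
        · exact Or.inr ⟨h1, rl', h2, h3⟩

theorem pv_mem_refIndex (translations : List (String × List (String × String)))
    (hpre : ∀ p ∈ translations, p.1 ∈ pvRefLangs → (p.2.map Prod.fst).Nodup) (fn term : String) :
    (term ∈ (pvRefIndex translations).getD fn PySem.Set.empty) ↔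
      term ∈ pvTerms ∧ ∃ rl ∈ pvRefLangs, pvRefHit translations fn term rl = true := by
  unfold pvRefIndex
  rw [pv_mem_langFold translations hpre pvRefLangs (fun rl h => h) PySem.Dict.empty fn term]
  simp [PySem.Dict.getD_empty, PySem.Set.empty]

-- the A-side counter is positive iff some reference language hits
theorem pv_refcount_pos (translations : List (String × List (String × String))) (fn term : String) :
    (0 < pvRefLangs.foldl (fun n rl => if pvRefHit translations fn term rl then n + 1 else n) (0 : Int)) ↔
      ∃ rl ∈ pvRefLangs, pvRefHit translations fn term rl = true := by
  rw [PySem.List.foldl_if_add_one]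
  simp only [zero_add]
  constructor
  · intro h
    have : 0 < pvRefLangs.countP (fun rl => pvRefHit translations fn term rl) := by exact_mod_cast h
    exact List.countP_pos_iff.mp this
  · intro h
    have : 0 < pvRefLangs.countP (fun rl => pvRefHit translations fn term rl) :=
      List.countP_pos_iff.mpr h
    exact_mod_cast this

-- ===== VERDICT (by name: the statement is the Claim_ definition above) =====
theorem check_preserved_terms_spec : Claim_equal_check_preserved_terms := by
  intro tr _dom hpre
  unfold Spec_check_preserved_terms check_preserved_terms check_preserved_terms_alt
  apply PySem.List.foldl_congr_mem
  intro acc p _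
  by_cases hc : pvRefLangs.contains p.1
  · simp only [hc, if_pos]
  · simp only [hc, Bool.false_eq_true, if_neg, not_false_iff]
    apply PySem.List.foldl_congr_mem
    intro acc2 q _
    apply PySem.List.foldl_congr_mem
    intro acc3 term ht
    have hidx : PySem.Set.contains ((pvRefIndex tr).getD q.1 PySem.Set.empty) term = true ↔
        ∃ rl ∈ pvRefLangs, pvRefHit tr q.1 term rl = true := by
      rw [PySem.Set.contains_iff, pv_mem_refIndex tr hpre q.1 term]
      simp [ht]
    by_cases hex : ∃ rl ∈ pvRefLangs, pvRefHit tr q.1 term rl = true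
    · have hpos := (pv_refcount_pos tr q.1 term).mpr hex
      have hcon := hidx.mpr hex
      simp only [hpos, if_pos, hcon, Bool.true_and, List.any_cons, List.any_nil, Bool.or_false]
      by_cases h1 : PySem.Str.isIn term q.2 <;>
        by_cases h2 : PySem.Str.isIn (PySem.Str.lower term) q.2 <;>
          by_cases h3 : PySem.Str.isIn (PySem.Str.upper term) q.2 <;>
            simp_all
    · have hnpos : ¬ (0 < pvRefLangs.foldl (fun n rl => if pvRefHit tr q.1 term rl then n + 1 else n) (0 : Int)) :=
        fun h => hex ((pv_refcount_pos tr q.1 term).mp h)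
      have hmem : term ∉ (pvRefIndex tr).getD q.1 ([] : List String) :=
        fun h => hex ((pv_mem_refIndex tr hpre q.1 term).mp h).2
      simp [hnpos, hmem]
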